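-- pv_equiv track=rewrite | github.com/JAAFAR1996/ai-teddy-bear- | deprecated/legacy_core/src_core_old/domain/safety/context_analyzer.py | _detect_behavioral_concerns
-- ===== SOURCE A (Python) =====
-- from typing import List, Dict, Optional
--
-- def _detect_behavioral_concerns(history: List[str]) -> List[str]:
--     """Detect behavioral concerns in conversation"""
--     concerns = []
--
--     if len(history) < 2:
--         return concerns
--
--     # Check for repetitive concerning themes
--     concerning_themes = {
--         "loneliness": ["alone", "lonely", "no friends"],
--         "sadness": ["sad", "cry", "upset"],
--         "fear": ["scared", "afraid", "nightmare"],
--         "anger": ["angry", "mad", "hate"]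
--     }
--
--     recent_history = history[-5:]
--
--     for theme, keywords in concerning_themes.items():
--         theme_count = 0
--         for text in recent_history:
--             if any(keyword in text.lower() for keyword in keywords):
--                 theme_count += 1
--
--         if theme_count >= 2:
--             concerns.append(f"repetitive_{theme}")
--
--     # Check for privacy concerns
--     privacy_keywords = ["address", "phone", "password", "secret"]
--     for text in recent_history:
--         if any(keyword in text.lower() for keyword in privacy_keywords):
--             concerns.append("privacy_risk")
--             break
--
--     return concerns
-- ===== SOURCE B (Python) =====
-- from typing import List
--
-- def _detect_behavioral_concerns(history: List[str]) -> List[str]: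
--     """Detect behavioral concerns via a seen/repeated set construction:
--     no counters -- a theme is 'repetitive' exactly when it is hit by a text
--     after already having been seen in an earlier recent text."""
--     if len(history) < 2:
--         return []
--
--     themes = {
--         "loneliness": ["alone", "lonely", "no friends"],
--         "sadness": ["sad", "cry", "upset"],
--         "fear": ["scared", "afraid", "nightmare"],
--         "anger": ["angry", "mad", "hate"],
--     }
--     privacy_keywords = ["address", "phone", "password", "secret"]
--
--     seen = set()
--     repeated = set()
--     for text in history[-5:]:
--         lo = text.lower()
--         hits = {name for name, kws in themes.items() if any(k in lo for k in kws)}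
--         if any(k in lo for k in privacy_keywords):
--             hits.add("privacy_risk")
--         repeated |= seen & hits
--         seen |= hits
--
--     out = ["repetitive_" + name for name in themes if name in repeated]
--     if "privacy_risk" in seen:
--         out.append("privacy_risk")
--     return out
-- ===== Notes on version B (the rewrite author's own statement) =====
-- stated objective: alternative
-- what changed: Replaces A's per-theme counting scans by a set construction: one pass over history[-5:] computes each text's hit-set of theme names (plus privacy), maintains 'seen' and 'repeated' sets ('repeated |= seen & hits'), and emits a theme as repetitive exactly when it was hit after having been seen before; no counters or thresholds exist in B.
import Mathlib
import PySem

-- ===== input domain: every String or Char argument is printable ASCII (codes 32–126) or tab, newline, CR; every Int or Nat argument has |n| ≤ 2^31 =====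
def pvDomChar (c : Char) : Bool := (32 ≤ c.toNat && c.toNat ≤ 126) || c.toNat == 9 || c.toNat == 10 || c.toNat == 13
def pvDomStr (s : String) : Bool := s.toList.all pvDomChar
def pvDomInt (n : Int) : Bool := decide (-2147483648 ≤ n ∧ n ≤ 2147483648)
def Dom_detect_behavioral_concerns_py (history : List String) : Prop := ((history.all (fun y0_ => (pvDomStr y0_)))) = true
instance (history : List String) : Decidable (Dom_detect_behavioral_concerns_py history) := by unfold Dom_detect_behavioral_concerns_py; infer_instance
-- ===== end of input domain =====

-- B replaces A's per-theme counting scans by a seen/repeated set construction over one pass of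
-- history[-5:]; no counters exist in B. Same return value.

-- ===== PORT A =====
-- the concerning_themes dict of A, as an association list in insertion order
def pvThemes : List (String × List String) :=
  [("loneliness", ["alone", "lonely", "no friends"]),
   ("sadness", ["sad", "cry", "upset"]),
   ("fear", ["scared", "afraid", "nightmare"]),
   ("anger", ["angry", "mad", "hate"])]

def pvPrivacyKeywords : List String := ["address", "phone", "password", "secret"]

def detect_behavioral_concerns_py (history : List String) : List String :=
  if history.length < 2 then [] else
    let recent_history := PySem.List.slice history (some (-5)) none
    -- for theme, keywords in concerning_themes.items(): count texts that match, append flag if ≥ 2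
    let concerns := pvThemes.foldl
      (fun (concerns : List String) tk =>
        let theme_count : Int := recent_history.foldl
          (fun (c : Int) text =>
            if tk.2.any (fun kw => PySem.Str.isIn kw (PySem.Str.lower text)) then c + 1 else c) 0
        if 2 ≤ theme_count then concerns ++ ["repetitive_" ++ tk.1] else concerns) []
    -- privacy loop with break: append once if some recent text matches a privacy keyword
    if recent_history.any
        (fun text => pvPrivacyKeywords.any (fun kw => PySem.Str.isIn kw (PySem.Str.lower text))) then
      concerns ++ ["privacy_risk"]
    else concerns

-- ===== PORT B =====
-- any(k in lo for k in kws)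
def pvMatchB (kws : List String) (lo : String) : Bool :=
  kws.any (fun k => PySem.Str.isIn k lo)

-- hits = {name for name, kws in themes.items() if any(k in lo for k in kws)} (+ 'privacy_risk')
def pvHitsB (text : String) : PySem.Set String :=
  let lo := PySem.Str.lower text
  let hits := PySem.Set.ofList ((pvThemes.filter (fun tk => pvMatchB tk.2 lo)).map (fun tk => tk.1))
  if pvMatchB pvPrivacyKeywords lo then PySem.Set.add hits "privacy_risk" else hits

-- loop body: repeated |= seen & hits; seen |= hits
def pvStepB (st : PySem.Set String × PySem.Set String) (text : String) :
    PySem.Set String × PySem.Set String :=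
  let hits := pvHitsB text
  (PySem.Set.union st.1 hits, PySem.Set.union st.2 (PySem.Set.inter st.1 hits))

def detect_behavioral_concerns_py_alt (history : List String) : List String :=
  if history.length < 2 then [] else
    let st := (PySem.List.slice history (some (-5)) none).foldl pvStepB
      (PySem.Set.empty, PySem.Set.empty)
    let out := (pvThemes.filter (fun tk => PySem.Set.contains st.2 tk.1)).map
      (fun tk => "repetitive_" ++ tk.1)
    if PySem.Set.contains st.1 "privacy_risk" then out ++ ["privacy_risk"] else out

-- ===== PRECONDITION & SPEC =====
def Spec_detect_behavioral_concerns_py (history : List String) (out : List String) : Prop := out = detect_behavioral_concerns_py_alt history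
instance (history : List String) (out : List String) : Decidable (Spec_detect_behavioral_concerns_py history out) := by unfold Spec_detect_behavioral_concerns_py; infer_instance

-- ===== CLAIM (what is proved, stated in full; the proofs are below) =====
def Claim_equal_detect_behavioral_concerns_py : Prop := ∀ (history : List String), Dom_detect_behavioral_concerns_py history → Spec_detect_behavioral_concerns_py history (detect_behavioral_concerns_py history)

-- ===== LEMMAS AND PROOFS =====

-- whether text's hit-set contains x, as a predicate on the text
def pvHitIn (x : String) (text : String) : Bool := PySem.Set.contains (pvHitsB text) x

lemma hitIn_iff (x t : String) : pvHitIn x t = true ↔ x ∈ pvHitsB t := by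
  simp [pvHitIn]

-- membership after B's fold: seen = hit at least once, repeated = hit at least twice
lemma fold_mem (x : String) (r : List String) (seen rep : PySem.Set String) :
    ((x ∈ (r.foldl pvStepB (seen, rep)).1) ↔ (x ∈ seen ∨ ∃ t ∈ r, pvHitIn x t)) ∧
    ((x ∈ (r.foldl pvStepB (seen, rep)).2) ↔
      (x ∈ rep ∨ (x ∈ seen ∧ ∃ t ∈ r, pvHitIn x t) ∨ 2 ≤ r.countP (pvHitIn x))) := by
  induction r generalizing seen rep with
  | nil => simp
  | cons t r ih =>
    rw [List.foldl_cons]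
    have hstep : pvStepB (seen, rep) t =
        (PySem.Set.union seen (pvHitsB t),
         PySem.Set.union rep (PySem.Set.inter seen (pvHitsB t))) := rfl
    rw [hstep]
    obtain ⟨h1, h2⟩ := ih (PySem.Set.union seen (pvHitsB t))
      (PySem.Set.union rep (PySem.Set.inter seen (pvHitsB t)))
    rw [h1, h2]
    simp only [PySem.Set.mem_union, PySem.Set.mem_inter, List.countP_cons,
      List.exists_mem_cons_iff, ← hitIn_iff x t]
    have hCnt : (∃ u ∈ r, pvHitIn x u = true) ↔ 0 < List.countP (pvHitIn x) r :=
      List.countP_pos_iff.symm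
    cases hb : pvHitIn x t
    · simp
    · refine ⟨by simp, ?_⟩
      rw [hCnt]
      by_cases hD : x ∈ rep <;> by_cases hA : x ∈ seen <;> simp [hD, hA]
      exact fun h => List.countP_pos_iff.mp (by omega)

-- membership in a text's hit-set
lemma mem_hits (t x : String) :
    x ∈ pvHitsB t ↔
      ((∃ tk ∈ pvThemes, x = tk.1 ∧ pvMatchB tk.2 (PySem.Str.lower t)) ∨
       (x = "privacy_risk" ∧ pvMatchB pvPrivacyKeywords (PySem.Str.lower t))) := by
  have hof : ∀ y : String,
      y ∈ PySem.Set.ofList ((pvThemes.filter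
            (fun tk => pvMatchB tk.2 (PySem.Str.lower t))).map (fun tk => tk.1)) ↔
        ∃ tk ∈ pvThemes, y = tk.1 ∧ pvMatchB tk.2 (PySem.Str.lower t) := by
    intro y
    rw [PySem.Set.mem_ofList]
    simp only [List.mem_map, List.mem_filter]
    constructor
    · rintro ⟨tk, ⟨htk, hm⟩, hy⟩
      exact ⟨tk, htk, hy.symm, hm⟩
    · rintro ⟨tk, htk, hy, hm⟩
      exact ⟨tk, ⟨htk, hm⟩, hy.symm⟩
  by_cases hp : pvMatchB pvPrivacyKeywords (PySem.Str.lower t) = true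
  · rw [show pvHitsB t = PySem.Set.add (PySem.Set.ofList ((pvThemes.filter
        (fun tk => pvMatchB tk.2 (PySem.Str.lower t))).map (fun tk => tk.1))) "privacy_risk"
      from by simp only [pvHitsB]; rw [if_pos hp]]
    rw [PySem.Set.mem_add, hof x]
    constructor
    · rintro (h | h)
      · exact Or.inl h
      · exact Or.inr ⟨h, hp⟩
    · rintro (h | ⟨h, _⟩)
      · exact Or.inl h
      · exact Or.inr h
  · rw [show pvHitsB t = PySem.Set.ofList ((pvThemes.filter
        (fun tk => pvMatchB tk.2 (PySem.Str.lower t))).map (fun tk => tk.1))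
      from by simp only [pvHitsB]; rw [if_neg hp]]
    rw [hof x]
    constructor
    · exact Or.inl
    · rintro (h | ⟨_, hm⟩)
      · exact h
      · exact absurd hm hp

-- pvHitIn on a theme name and on "privacy_risk"
lemma hitIn_theme (name : String) (kws : List String) (h : (name, kws) ∈ pvThemes)
    (hne : name ≠ "privacy_risk")
    (huniq : ∀ tk ∈ pvThemes, tk.1 = name → tk.2 = kws) (t : String) :
    pvHitIn name t = pvMatchB kws (PySem.Str.lower t) := by
  rw [Bool.eq_iff_iff, hitIn_iff, mem_hits]
  constructor
  · rintro (⟨tk, htk, hx, hm⟩ | ⟨hx, _⟩)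
    · rw [huniq tk htk hx.symm] at hm; exact hm
    · exact absurd hx hne
  · intro hb
    exact Or.inl ⟨(name, kws), h, rfl, hb⟩

lemma hitIn_privacy (t : String) :
    pvHitIn "privacy_risk" t = pvMatchB pvPrivacyKeywords (PySem.Str.lower t) := by
  rw [Bool.eq_iff_iff, hitIn_iff, mem_hits]
  constructor
  · rintro (⟨tk, htk, hx, _⟩ | ⟨_, hm⟩)
    · exfalso; fin_cases htk <;> simp_all
    · exact hm
  · intro hb
    exact Or.inr ⟨rfl, hb⟩

-- A's per-theme counter is a countP over the recent history
lemma a_count_eq (r : List String) (kws : List String) :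
    r.foldl (fun (c : Int) text =>
      if kws.any (fun kw => PySem.Str.isIn kw (PySem.Str.lower text)) then c + 1 else c) 0
    = (r.countP (fun text => pvMatchB kws (PySem.Str.lower text)) : Int) := by
  rw [PySem.List.foldl_count_if]
  simp [pvMatchB]

-- ===== VERDICT (by name: the statement is the Claim_ definition above) =====
theorem detect_behavioral_concerns_py_spec : Claim_equal_detect_behavioral_concerns_py := by
  intro history _
  unfold Spec_detect_behavioral_concerns_py detect_behavioral_concerns_py detect_behavioral_concerns_py_alt
  by_cases h : history.length < 2
  · simp [h]
  · simp only [h, if_false]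
    set r := PySem.List.slice history (some (-5)) none with hr
    set st := r.foldl pvStepB (PySem.Set.empty, PySem.Set.empty) with hst
    -- pvHitIn on each relevant name, as a function equality
    have hf1 : pvHitIn "loneliness" =
        fun t => pvMatchB ["alone", "lonely", "no friends"] (PySem.Str.lower t) :=
      funext (hitIn_theme "loneliness" _ (by simp [pvThemes]) (by decide) (by decide))
    have hf2 : pvHitIn "sadness" =
        fun t => pvMatchB ["sad", "cry", "upset"] (PySem.Str.lower t) :=
      funext (hitIn_theme "sadness" _ (by simp [pvThemes]) (by decide) (by decide))
    have hf3 : pvHitIn "fear" =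
        fun t => pvMatchB ["scared", "afraid", "nightmare"] (PySem.Str.lower t) :=
      funext (hitIn_theme "fear" _ (by simp [pvThemes]) (by decide) (by decide))
    have hf4 : pvHitIn "anger" =
        fun t => pvMatchB ["angry", "mad", "hate"] (PySem.Str.lower t) :=
      funext (hitIn_theme "anger" _ (by simp [pvThemes]) (by decide) (by decide))
    have hfp : pvHitIn "privacy_risk" =
        fun t => pvMatchB pvPrivacyKeywords (PySem.Str.lower t) :=
      funext hitIn_privacy
    -- membership in B's final repeated / seen sets
    have hrep : ∀ x : String, PySem.Set.contains st.2 x = true ↔ 2 ≤ r.countP (pvHitIn x) := by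
      intro x
      rw [PySem.Set.contains_iff, hst, (fold_mem x r PySem.Set.empty PySem.Set.empty).2]
      simp [PySem.Set.empty]
    have hseen : ∀ x : String, PySem.Set.contains st.1 x = true ↔ ∃ t ∈ r, pvHitIn x t := by
      intro x
      rw [PySem.Set.contains_iff, hst, (fold_mem x r PySem.Set.empty PySem.Set.empty).1]
      simp [PySem.Set.empty]
    -- the five branch conditions
    by_cases h1 : 2 ≤ r.countP (fun t => pvMatchB ["alone", "lonely", "no friends"] (PySem.Str.lower t)) <;>
    by_cases h2 : 2 ≤ r.countP (fun t => pvMatchB ["sad", "cry", "upset"] (PySem.Str.lower t)) <;>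
    by_cases h3 : 2 ≤ r.countP (fun t => pvMatchB ["scared", "afraid", "nightmare"] (PySem.Str.lower t)) <;>
    by_cases h4 : 2 ≤ r.countP (fun t => pvMatchB ["angry", "mad", "hate"] (PySem.Str.lower t)) <;>
    by_cases hp : ∃ t ∈ r, pvMatchB pvPrivacyKeywords (PySem.Str.lower t) <;>
    · -- B side: boolean values of the five tests
      have hb1 : PySem.Set.contains st.2 "loneliness" = decide (2 ≤ r.countP (fun t => pvMatchB ["alone", "lonely", "no friends"] (PySem.Str.lower t))) := by
        rw [Bool.eq_iff_iff, hrep, hf1]; simp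
      have hb2 : PySem.Set.contains st.2 "sadness" = decide (2 ≤ r.countP (fun t => pvMatchB ["sad", "cry", "upset"] (PySem.Str.lower t))) := by
        rw [Bool.eq_iff_iff, hrep, hf2]; simp
      have hb3 : PySem.Set.contains st.2 "fear" = decide (2 ≤ r.countP (fun t => pvMatchB ["scared", "afraid", "nightmare"] (PySem.Str.lower t))) := by
        rw [Bool.eq_iff_iff, hrep, hf3]; simp
      have hb4 : PySem.Set.contains st.2 "anger" = decide (2 ≤ r.countP (fun t => pvMatchB ["angry", "mad", "hate"] (PySem.Str.lower t))) := by
        rw [Bool.eq_iff_iff, hrep, hf4]; simp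
      have hbp : PySem.Set.contains st.1 "privacy_risk" = decide (∃ t ∈ r, pvMatchB pvPrivacyKeywords (PySem.Str.lower t)) := by
        rw [Bool.eq_iff_iff, hseen, hfp]; simp
      have hany : (r.any fun text => pvPrivacyKeywords.any fun kw => PySem.Str.isIn kw (PySem.Str.lower text)) = decide (∃ t ∈ r, pvMatchB pvPrivacyKeywords (PySem.Str.lower t)) := by
        rw [Bool.eq_iff_iff]; simp [pvMatchB]
      simp only [pvThemes, List.foldl_cons, List.foldl_nil, List.filter_cons, List.filter_nil,
        a_count_eq, hb1, hb2, hb3, hb4, hbp, hany]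
      have hc : ∀ n : Nat, ((2:Int) ≤ (n : Int)) ↔ 2 ≤ n := fun n => by exact_mod_cast Iff.rfl
      simp only [hc]
      simp [h1, h2, h3, h4, hp]
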